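-- pv_equiv track=rewrite | github.com/suixin233/OJ | youqu_paixu.py | interesting_paixu
-- ===== SOURCE A (Python) =====
-- def interesting_paixu(n, line):
--     seq = []
--     lineSort = sorted(line)
--     seq.append(line.index(lineSort[0]))
--     count = 0
--     for i in range(1, n):
--         seq.append(line.index(lineSort[i]))
--         if seq[i] < seq[i-1]:
--             count += 1
--             seq[i] = seq[i-1]
--     if max(line) == line[-1] and count > 0:
--         count += 1
--     return count
-- ===== SOURCE B (Python) =====
-- def interesting_paixu(n, line):
--     # Counts, among the n smallest elements, those preceded (in value order) by a
--     # value whose first occurrence lies further right; computed per element via a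
--     # suffix-minimum table over first-occurrence positions instead of a descent
--     # scan of sorted positions.
--     if n <= 1:
--         return 0
--     first = {}
--     for p, v in enumerate(line):
--         if v not in first:
--             first[v] = p
--     L = len(line)
--     # sufmin[p] = smallest value whose FIRST occurrence is at position >= p (None if none)
--     sufmin = [None] * (L + 1)
--     m = None
--     for p in range(L - 1, -1, -1):
--         v = line[p]
--         if first[v] == p and (m is None or v < m):
--             m = v
--         sufmin[p] = m
--     T = sorted(line)[n - 1]  # threshold: the n-th smallest (raises when n > len(line))
--     count = 0
--     less = 0
--     for v in line:
--         if v < T: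
--             less += 1
--             s = sufmin[first[v] + 1]
--             if s is not None and s < v:
--                 count += 1
--     s = sufmin[first[T] + 1]
--     if s is not None and s < T:
--         count += n - less
--     if line[-1] == max(line) and count > 0:
--         count += 1
--     return count
-- ===== Notes on version B (the rewrite author's own statement) =====
-- stated objective: faster
-- what changed: replaces A's descent scan over sorted positions (with an O(n) line.index scan per iteration and a growing seq list) by a per-element criterion: an element of the n smallest is counted iff some strictly smaller value first occurs further right, decided in O(1) via a suffix-minimum table over first-occurrence positions built in one backward pass; the single sort only supplies the n-th-smallest threshold
import Mathlib
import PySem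

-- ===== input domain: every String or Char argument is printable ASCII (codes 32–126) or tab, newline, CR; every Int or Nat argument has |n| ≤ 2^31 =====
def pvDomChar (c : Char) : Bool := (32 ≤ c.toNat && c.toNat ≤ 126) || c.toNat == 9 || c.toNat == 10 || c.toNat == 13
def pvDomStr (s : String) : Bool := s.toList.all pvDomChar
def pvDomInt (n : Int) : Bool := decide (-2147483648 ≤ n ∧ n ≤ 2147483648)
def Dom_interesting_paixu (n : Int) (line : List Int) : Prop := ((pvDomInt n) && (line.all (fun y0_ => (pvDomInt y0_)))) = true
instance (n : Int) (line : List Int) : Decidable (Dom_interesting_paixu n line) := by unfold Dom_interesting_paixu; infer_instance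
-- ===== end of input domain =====

-- B replaces A's descent scan over sorted positions (with its repeated line.index
-- scans) by a per-element criterion: an element of the n smallest is counted iff
-- some smaller value first occurs further right, decided via a suffix-minimum
-- table over first-occurrence positions; one sort only fixes the n-th-smallest
-- threshold.

-- ===== PORT A =====
def interesting_paixu (n : Int) (line : List Int) : Int :=
  let lineSort := PySem.List.sorted line (fun x => x) false
  -- line.index(...) cannot fail here (the looked-up value comes from sorted(line));
  -- lineSort[0] / lineSort[i] are in range under Pre_, so pyGetD/getD are exact.
  let seq : List Int := [] ++ [(((PySem.List.index? line (PySem.List.pyGetD lineSort 0 0)).getD 0 : Nat) : Int)]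
  let st := (PySem.List.pyRange 1 n 1).foldl (fun (st : List Int × Int) i =>
      let seq := st.1 ++ [(((PySem.List.index? line (PySem.List.pyGetD lineSort i 0)).getD 0 : Nat) : Int)]
      if PySem.List.pyGetD seq i 0 < PySem.List.pyGetD seq (i - 1) 0 then
        (PySem.List.pySetD seq i (PySem.List.pyGetD seq (i - 1) 0), st.2 + 1)
      else (seq, st.2)) (seq, 0)
  let count := st.2
  if PySem.List.max? line (fun x => x) = PySem.List.pyGet? line (-1) ∧ count > 0 then count + 1
  else count

-- ===== PORT B =====
def interesting_paixu_alt (n : Int) (line : List Int) : Int :=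
  if n ≤ 1 then 0
  else
    let first := (PySem.List.enumerate line 0).foldl
        (fun d (p : Int × Int) => if d.contains p.2 then d else d.insert p.2 p.1) PySem.Dict.empty
    let L : Int := (line.length : Int)
    -- backward loop filling sufmin[p] = smallest value whose first occurrence is at position ≥ p
    let sm := (PySem.List.pyRange (L - 1) (-1) (-1)).foldl
        (fun (st : List (Option Int) × Option Int) p =>
          let v := PySem.List.pyGetD line p 0
          let m := if decide ((first.get? v).getD 0 = p) &&
                      (match st.2 with | none => true | some s => decide (v < s)) then some v else st.2
          (PySem.List.pySetD st.1 p m, m))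
        (List.replicate (L.toNat + 1) none, none)
    let sufmin := sm.1
    -- threshold: the n-th smallest (sorted(line)[n-1] raises when n > len(line) — outside Pre_)
    let T := PySem.List.pyGetD (PySem.List.sorted line (fun x => x) false) (n - 1) 0
    let cl := line.foldl
        (fun (cl : Int × Int) v =>
          if v < T then
            ((match PySem.List.pyGetD sufmin ((first.get? v).getD 0 + 1) none with
              | some s => if s < v then cl.1 + 1 else cl.1
              | none => cl.1), cl.2 + 1)
          else cl)
        (0, 0)
    let count := match PySem.List.pyGetD sufmin ((first.get? T).getD 0 + 1) none with
      | some s => if s < T then cl.1 + (n - cl.2) else cl.1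
      | none => cl.1
    if PySem.List.pyGet? line (-1) = PySem.List.max? line (fun x => x) ∧ count > 0 then count + 1
    else count

-- ===== PRECONDITION & SPEC =====
-- Pre_ excludes exactly the inputs where A raises: empty line (IndexError on sorted(line)[0],
-- ValueError on max([])) and n > len(line) (IndexError on sorted(line)[i]).
def Pre_interesting_paixu (n : Int) (line : List Int) : Prop :=
  line ≠ [] ∧ n ≤ line.length
instance (n : Int) (line : List Int) : Decidable (Pre_interesting_paixu n line) := by
  unfold Pre_interesting_paixu; infer_instance
def pvWitness_interesting_paixu : Int × List Int := (3, [2, 1, 3])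

def Spec_interesting_paixu (n : Int) (line : List Int) (out : Int) : Prop := out = interesting_paixu_alt n line
instance (n : Int) (line : List Int) (out : Int) : Decidable (Spec_interesting_paixu n line out) := by unfold Spec_interesting_paixu; infer_instance

-- ===== CLAIM (what is proved, stated in full; the proofs are below) =====
def Claim_equal_interesting_paixu : Prop := ∀ (n : Int) (line : List Int), Dom_interesting_paixu n line → Pre_interesting_paixu n line → Spec_interesting_paixu n line (interesting_paixu n line)

-- ===== LEMMAS AND PROOFS =====

-- B's per-value criterion: some strictly smaller value of line first occurs strictly later.
def pvPred (line : List Int) (v : Int) : Bool :=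
  line.any (fun w => decide (w < v) && decide (line.idxOf v < line.idxOf w))

-- invariant of B's backward loop: m is the least value whose first occurrence is at position ≥ p
def pvInv (line : List Int) (p : Int) (m : Option Int) : Prop :=
  match m with
  | none => ∀ w ∈ line, (line.idxOf w : Int) < p
  | some s => s ∈ line ∧ p ≤ (line.idxOf s : Int) ∧ ∀ w ∈ line, p ≤ (line.idxOf w : Int) → s ≤ w

-- A fold over (index, value) pairs that only inserts fresh keys leaves existing keys alone.
theorem pv_fold_preserve (ps : List (Int × Int)) (d : PySem.Dict Int Int) (v : Int)
    (hd : d.contains v = true) :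
    (ps.foldl (fun d (p : Int × Int) => if d.contains p.2 then d else d.insert p.2 p.1) d).get? v
      = d.get? v := by
  induction ps generalizing d with
  | nil => rfl
  | cons p t ih =>
    simp only [List.foldl_cons]
    by_cases h : d.contains p.2
    · rw [if_pos h, ih d hd]
    · rw [if_neg h]
      have hne : v ≠ p.2 := fun he => h (he ▸ hd)
      rw [ih _ (by simp [PySem.Dict.contains_insert, hd]), PySem.Dict.get?_insert]
      simp [hne]

-- The first-index dict maps every member of l to its first index.
theorem pv_first_get (l : List Int) (s0 : Int) (d : PySem.Dict Int Int) (v : Int)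
    (hv : v ∈ l) (hd : d.contains v = false) :
    ((PySem.List.enumerate l s0).foldl
        (fun d (p : Int × Int) => if d.contains p.2 then d else d.insert p.2 p.1) d).get? v
      = some (s0 + (l.idxOf v : Int)) := by
  induction l generalizing s0 d with
  | nil => cases hv
  | cons x t ih =>
    rw [PySem.List.enumerate_cons]
    simp only [List.foldl_cons]
    by_cases hx : v = x
    · subst hx
      rw [if_neg (by simp [hd]), pv_fold_preserve _ _ _ (by simp [PySem.Dict.contains_insert_self]),
        PySem.Dict.get?_insert_self]
      simp [List.idxOf_cons_self]
    · have hvt : v ∈ t := List.mem_of_ne_of_mem hx hv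
      have hidx : ((x :: t).idxOf v : Int) = (t.idxOf v : Int) + 1 := by
        rw [List.idxOf_cons_ne _ (by simpa using fun h => hx h.symm)]
        push_cast; ring
      by_cases h : d.contains x
      · rw [if_pos h, ih _ _ hvt hd, hidx]; ring_nf
      · rw [if_neg h, ih _ _ hvt (by simp [PySem.Dict.contains_insert, hd, hx]), hidx]
        ring_nf

-- list.index of a member is its first index.
theorem pv_index?_mem (l : List Int) (v : Int) (hv : v ∈ l) :
    PySem.List.index? l v = some (l.idxOf v) := by
  induction l with
  | nil => cases hv
  | cons x t ih =>
    by_cases hx : x = v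
    · subst hx
      rw [PySem.List.index?_cons_self, List.idxOf_cons_self]
    · have hvt : v ∈ t := List.mem_of_ne_of_mem (fun h => hx h.symm) hv
      rw [PySem.List.index?_cons_of_ne _ hx, ih hvt, List.idxOf_cons_ne _ hx]
      rfl

-- A's loop: the counter counts indices whose g-value is below some earlier g-value;
-- the seq list has length k and ends in the running maximum.
theorem pv_loopA (g : Int → Int) (k : Int) (h1 : 1 ≤ k) :
    ∃ (seq : List Int) (m : Int),
      (PySem.List.pyRange 1 k 1).foldl (fun (st : List Int × Int) i =>
          let seq := st.1 ++ [g i]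
          if PySem.List.pyGetD seq i 0 < PySem.List.pyGetD seq (i - 1) 0 then
            (PySem.List.pySetD seq i (PySem.List.pyGetD seq (i - 1) 0), st.2 + 1)
          else (seq, st.2)) ([] ++ [g 0], 0)
        = (seq, (((PySem.List.pyRange 1 k 1).countP
            (fun i => (PySem.List.pyRange 0 i 1).any (fun j => decide (g i < g j)))) : Int))
      ∧ seq.length = k.toNat ∧ seq.getLast? = some m
      ∧ (∀ j, 0 ≤ j → j < k → g j ≤ m) ∧ (∃ j, 0 ≤ j ∧ j < k ∧ g j = m) := by
  induction k, h1 using Int.le_induction with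
  | base =>
    rw [PySem.List.pyRange_one_eq_nil (by omega : (1:Int) ≤ 1)]
    refine ⟨[g 0], g 0, by simp, by simp, by simp, ?_, ⟨0, by omega, by omega, rfl⟩⟩
    intro j h0 h1
    have hj : j = 0 := by omega
    rw [hj]
  | succ k hk ih =>
    obtain ⟨seq, m, hA, hlen, hlast, hmax, hex⟩ := ih
    have hne : seq ≠ [] := by
      intro h; rw [h] at hlen; simp at hlen; omega
    have hklen : k.toNat = seq.length := hlen.symm
    have hany : (PySem.List.pyRange 0 k 1).any (fun j => decide (g k < g j))
        = decide (g k < m) := by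
      by_cases hlt : g k < m
      · rw [decide_eq_true hlt]
        obtain ⟨j0, hj0, hj0k, hj0m⟩ := hex
        rw [List.any_eq_true]
        exact ⟨j0, (PySem.List.mem_pyRange_one).mpr ⟨hj0, hj0k⟩, by simp [hj0m, hlt]⟩
      · rw [decide_eq_false hlt, List.any_eq_false]
        intro j hj
        obtain ⟨h0j, hjk⟩ := (PySem.List.mem_pyRange_one).mp hj
        have := hmax j h0j hjk
        simp only [decide_eq_true_eq]
        omega
    have hcnt : (((PySem.List.pyRange 1 k 1 ++ [k]).countP
          (fun i => (PySem.List.pyRange 0 i 1).any (fun j => decide (g i < g j)))) : Int)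
        = (((PySem.List.pyRange 1 k 1).countP
          (fun i => (PySem.List.pyRange 0 i 1).any (fun j => decide (g i < g j)))) : Int)
          + (if g k < m then 1 else 0) := by
      rw [List.countP_append]
      simp only [List.countP_cons, List.countP_nil, hany]
      by_cases hlt : g k < m <;> simp [hlt]
    rw [PySem.List.pyRange_one_succ_right (by omega : (1:Int) ≤ k), List.foldl_append, hA]
    simp only [List.foldl_cons, List.foldl_nil]
    have hget_k : PySem.List.pyGetD (seq ++ [g k]) k 0 = g k := by
      rw [PySem.List.pyGetD_eq_getElem _ _ (by omega) (by simp; omega)]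
      have : k.toNat = seq.length := hklen
      simp [this]
    have hlast_eq : seq.getLast hne = m := by
      have := seq.getLast?_eq_some_getLast hne
      rw [this] at hlast; exact Option.some.inj hlast
    have hget_k1 : PySem.List.pyGetD (seq ++ [g k]) (k - 1) 0 = m := by
      clear hex hmax hany hcnt
      rw [PySem.List.pyGetD_eq_getElem _ _ (by omega) (by simp; omega)]
      have h1' : (k - 1).toNat = seq.length - 1 := by omega
      rw [List.getElem_append_left (by omega)]
      rw [← hlast_eq, List.getLast_eq_getElem]
      congr 1
    rw [hget_k, hget_k1, hcnt]
    by_cases hlt : g k < m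
    · rw [if_pos hlt, if_pos hlt]
      refine ⟨_, m, rfl, ?_, ?_, ?_, ?_⟩
      · rw [PySem.List.pySetD_of_nonneg _ _ (by omega)]
        simp; omega
      · rw [PySem.List.pySetD_of_nonneg _ _ (by omega)]
        have : k.toNat = seq.length := hklen
        rw [this, List.set_append_right _ _ (le_refl _)]
        simp
      · intro j h0 hj
        by_cases hjk : j = k
        · subst hjk; omega
        · exact hmax j h0 (by omega)
      · obtain ⟨j0, hj0, hj0k, hj0m⟩ := hex
        exact ⟨j0, hj0, by omega, hj0m⟩
    · rw [if_neg hlt, if_neg hlt]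
      refine ⟨seq ++ [g k], g k, by simp, by simp; omega, by simp, ?_, ⟨k, by omega, by omega, rfl⟩⟩
      intro j h0 hj
      by_cases hjk : j = k
      · subst hjk; omega
      · have := hmax j h0 (by omega)
        omega

-- B's backward loop establishes pvInv at every table position.
theorem pv_sufLoop (xl : List Int) (k : Nat) (hk : k ≤ xl.length)
    (cur : List (Option Int)) (m : Option Int)
    (hlen : cur.length = xl.length + 1)
    (hm : pvInv xl k m)
    (habove : ∀ q : Nat, k ≤ q → q ≤ xl.length → pvInv xl q (cur.getD q none)) :
    ∀ q : Nat, q ≤ xl.length → pvInv xl q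
      (((PySem.List.pyRange ((k : Int) - 1) (-1) (-1)).foldl
        (fun (st : List (Option Int) × Option Int) p =>
          let v := PySem.List.pyGetD xl p 0
          let m := if decide ((((xl.idxOf v : Nat)) : Int) = p) &&
                      (match st.2 with | none => true | some s => decide (v < s)) then some v else st.2
          (PySem.List.pySetD st.1 p m, m)) (cur, m)).1.getD q none) := by
  induction k generalizing cur m with
  | zero =>
    rw [PySem.List.pyRange_neg_one_eq_nil (by omega)]
    intro q hq
    exact habove q (Nat.zero_le q) hq
  | succ k ih =>
    have hcons : ((k + 1 : Nat) : Int) - 1 = (k : Int) := by push_cast; ring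
    rw [hcons, PySem.List.pyRange_neg_one_cons (by omega), List.foldl_cons]
    simp only []
    have hkL : k < xl.length := by omega
    have hv : PySem.List.pyGetD xl (k : Int) 0 = xl[k]'hkL := by
      rw [PySem.List.pyGetD_eq_getElem _ _ (by omega) (by exact_mod_cast hkL)]
      congr 1
    set v := PySem.List.pyGetD xl (k : Int) 0 with hvdef
    have hvmem : v ∈ xl := by rw [hv]; exact List.getElem_mem hkL
    -- the value whose first occurrence is at position k, if any, is v
    have hat_k : ∀ w ∈ xl, xl.idxOf w = k → w = v := by
      intro w hw hwk
      have hlt : xl.idxOf w < xl.length := hwk ▸ hkL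
      have h1 : xl[xl.idxOf w]'hlt = w := List.getElem_idxOf hlt
      have h2 : xl[xl.idxOf w]'hlt = xl[k]'hkL := by congr 1
      rw [hv, ← h2]
      exact h1.symm
    have hm2 : pvInv xl ((k : Int) + 1) m := by
      rw [show ((k : Int) + 1) = ((k + 1 : Nat) : Int) by push_cast; ring]
      exact hm
    have hm'gen : ∀ (mm : Option Int), pvInv xl ((k : Int) + 1) mm →
        pvInv xl k (if decide (((xl.idxOf v : Nat) : Int) = (k : Int)) &&
          (match mm with | none => true | some s => decide (v < s)) then some v else mm) := by
      intro mm hmm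
      cases mm with
      | none =>
        simp only [pvInv] at hmm ⊢
        split_ifs with hcond
        · simp only [Bool.and_true, decide_eq_true_eq] at hcond
          refine ⟨hvmem, by omega, ?_⟩
          intro w hw hwk
          by_cases hwe : xl.idxOf w = k
          · rw [hat_k w hw hwe]
          · exact absurd (hmm w hw) (by push_cast; omega)
        · simp only [Bool.and_true, decide_eq_true_eq] at hcond
          intro w hw
          have h1 := hmm w hw
          by_cases hwe : xl.idxOf w = k
          · exfalso
            exact hcond (by rw [← hat_k w hw hwe, hwe])
          · push_cast at h1 ⊢; omega
      | some s =>
        obtain ⟨hs, hges, hmins⟩ := hmm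
        split_ifs with hcond
        · simp only [Bool.and_eq_true, decide_eq_true_eq] at hcond
          obtain ⟨hidxv, hvs⟩ := hcond
          refine ⟨hvmem, by omega, ?_⟩
          intro w hw hwk
          by_cases hwe : xl.idxOf w = k
          · rw [hat_k w hw hwe]
          · have := hmins w hw (by push_cast; omega)
            omega
        · simp only [Bool.and_eq_true, decide_eq_true_eq, not_and] at hcond
          refine ⟨hs, by push_cast at hges ⊢; omega, ?_⟩
          intro w hw hwk
          by_cases hwe : xl.idxOf w = k
          · have hwv := hat_k w hw hwe
            have hns : ¬ (v < s) := fun hws => hcond (by rw [← hwv, hwe]) hws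
            rw [hwv]
            omega
          · exact hmins w hw (by push_cast; omega)
    refine ih (by omega) _ _ ?_ (hm'gen m hm2) ?_
    · rw [PySem.List.pySetD_of_nonneg _ _ (by omega)]
      simp [hlen]
    · intro q hq hqL
      rw [PySem.List.pySetD_of_nonneg _ _ (by omega)]
      have htn : ((k : Int)).toNat = k := by simp
      rw [htn, List.getD_eq_getElem?_getD, List.getElem?_set]
      by_cases hqe : q = k
      · subst hqe
        rw [if_pos rfl, if_pos (by omega)]
        simp only [Option.getD_some]
        exact hm'gen m hm2
      · rw [if_neg (by omega), ← List.getD_eq_getElem?_getD]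
        exact habove q (by omega) hqL

-- the sufmin lookup at idxOf v + 1 decides pvPred.
theorem pv_lookup (line : List Int) (v : Int) (hv : v ∈ line) (m : Option Int)
    (hm : pvInv line ((line.idxOf v : Int) + 1) m) :
    ((m.map (fun u => decide (u < v))).getD false) = pvPred line v := by
  cases m with
  | none =>
    simp only [Option.map_none, Option.getD_none]
    simp only [pvInv] at hm
    symm
    simp only [pvPred, List.any_eq_false]
    intro w hw
    have := hm w hw
    simp only [Bool.and_eq_true, decide_eq_true_eq, not_and]
    intro _
    omega
  | some s =>
    simp only [Option.map_some, Option.getD_some]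
    obtain ⟨hs, hge, hmin⟩ := hm
    by_cases hlt : s < v
    · simp only [decide_eq_true hlt]
      symm
      simp only [pvPred, List.any_eq_true]
      exact ⟨s, hs, by simp only [Bool.and_eq_true, decide_eq_true_eq]; exact ⟨hlt, by omega⟩⟩
    · simp only [decide_eq_false hlt]
      symm
      simp only [pvPred, List.any_eq_false]
      intro w hw
      simp only [Bool.and_eq_true, decide_eq_true_eq, not_and]
      intro hwv hidx
      have := hmin w hw (by omega)
      omega

-- count transfer from sorted positions to values (A side).
theorem pv_countA (line : List Int) (n : Int) (hne : line ≠ []) (h2 : 2 ≤ n)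
    (hn : n ≤ (line.length : Int)) :
    ((PySem.List.pyRange 1 n 1).countP
        (fun i => (PySem.List.pyRange 0 i 1).any (fun j =>
          decide ((line.idxOf (PySem.List.pyGetD (PySem.List.sorted line (fun x => x) false) i 0) : Int)
            < (line.idxOf (PySem.List.pyGetD (PySem.List.sorted line (fun x => x) false) j 0) : Int)))))
      = ((PySem.List.sorted line (fun x => x) false).take n.toNat).countP (pvPred line) := by
  set s := PySem.List.sorted line (fun x => x) false with hs
  have hL0 : 0 < line.length := List.length_pos_of_ne_nil hne
  have hslen : s.length = line.length := PySem.List.length_sorted ..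
  have hget : ∀ i : Int, 0 ≤ i → i < (line.length : Int) → ∀ (h : i.toNat < s.length),
      PySem.List.pyGetD s i 0 = s[i.toNat]'h := by
    intro i h0 hiL h
    rw [PySem.List.pyGetD_eq_getElem _ _ h0 (by omega)]
  have hmem : ∀ i : Int, 0 ≤ i → i < (line.length : Int) → PySem.List.pyGetD s i 0 ∈ line := by
    intro i h0 hi
    have hin : PySem.List.pyGetD s i 0 ∈ s := by
      apply PySem.List.pyGetD_mem
      unfold PySem.Raise.InRange
      rw [hslen]
      omega
    exact (PySem.List.mem_sorted _ _ _ _).mp hin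
  have hmono : ∀ (a b : Nat) (hab : a ≤ b) (hb : b < s.length), s[a]'(by omega) ≤ s[b]'hb := by
    intro a b hab hb
    exact PySem.List.sorted_id_getElem_mono line hab hb
  -- an element of line viewed in s: its position
  have hpos : ∀ w ∈ line, ∃ (j0 : Nat) (hj0 : j0 < s.length), s[j0]'hj0 = w := by
    intro w hw
    exact List.mem_iff_getElem.mp ((PySem.List.mem_sorted _ _ _ _).mpr hw)
  -- the sorted-position test agrees with the value test
  have hPeq : ∀ i : Int, 0 ≤ i → i < n →
      ((PySem.List.pyRange 0 i 1).any (fun j =>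
          decide ((line.idxOf (PySem.List.pyGetD s i 0) : Int) < (line.idxOf (PySem.List.pyGetD s j 0) : Int))))
        = pvPred line (PySem.List.pyGetD s i 0) := by
    intro i h0 hi
    rw [Bool.eq_iff_iff]
    constructor
    · intro hany
      rw [List.any_eq_true] at hany
      obtain ⟨j, hjmem, hj⟩ := hany
      obtain ⟨hj0, hji⟩ := (PySem.List.mem_pyRange_one).mp hjmem
      simp only [decide_eq_true_eq] at hj
      have hwmem : PySem.List.pyGetD s j 0 ∈ line := hmem j hj0 (by omega)
      have hle : PySem.List.pyGetD s j 0 ≤ PySem.List.pyGetD s i 0 := by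
        rw [hget j hj0 (by omega) (by omega), hget i h0 (by omega) (by omega)]
        exact hmono j.toNat i.toNat (by omega) (by omega)
      rw [pvPred, List.any_eq_true]
      refine ⟨_, hwmem, ?_⟩
      simp only [Bool.and_eq_true, decide_eq_true_eq]
      refine ⟨?_, by exact_mod_cast hj⟩
      rcases lt_or_eq_of_le hle with h | h
      · exact h
      · rw [h] at hj; omega
    · intro hp
      rw [pvPred, List.any_eq_true] at hp
      obtain ⟨w, hw, hcond⟩ := hp
      simp only [Bool.and_eq_true, decide_eq_true_eq] at hcond
      obtain ⟨hwlt, hidx⟩ := hcond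
      obtain ⟨j0, hj0len, hj0⟩ := hpos w hw
      rw [List.any_eq_true]
      have hji : (j0 : Int) < i := by
        by_contra hge
        push_neg at hge
        have hle : PySem.List.pyGetD s i 0 ≤ s[j0]'hj0len := by
          rw [hget i h0 (by omega) (by omega)]
          exact hmono i.toNat j0 (by omega) hj0len
        rw [hj0] at hle
        omega
      refine ⟨(j0 : Int), (PySem.List.mem_pyRange_one).mpr ⟨by omega, hji⟩, ?_⟩
      simp only [decide_eq_true_eq]
      have hgj : PySem.List.pyGetD s (j0 : Int) 0 = w := by
        rw [hget (j0 : Int) (by omega) (by omega) (by simpa using hj0len)]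
        simpa using hj0
      rw [hgj]
      omega
  -- the smallest sorted element satisfies neither test
  have hzero : pvPred line (PySem.List.pyGetD s 0 0) = false := by
    rw [pvPred, List.any_eq_false]
    intro w hw
    simp only [Bool.and_eq_true, decide_eq_true_eq, not_and]
    intro hwlt
    exfalso
    obtain ⟨j0, hj0len, hj0⟩ := hpos w hw
    have hle : PySem.List.pyGetD s 0 0 ≤ s[j0]'hj0len := by
      rw [hget 0 (by omega) (by omega) (by omega)]
      exact hmono 0 j0 (by omega) hj0len
    rw [hj0] at hle
    omega
  -- replace the position test by the value test on [1, n)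
  rw [List.countP_congr (fun i hi => by
    obtain ⟨h1, h2⟩ := (PySem.List.mem_pyRange_one).mp hi
    rw [hPeq i (by omega) h2])]
  -- extend to [0, n): the 0 term contributes nothing
  have hcons : PySem.List.pyRange 0 n 1 = 0 :: PySem.List.pyRange 1 n 1 := by
    rw [PySem.List.pyRange_one_cons (by omega : (0:Int) < n)]
    norm_num
  have hstep : (PySem.List.pyRange 1 n 1).countP (fun i => pvPred line (PySem.List.pyGetD s i 0))
      = (PySem.List.pyRange 0 n 1).countP (fun i => pvPred line (PySem.List.pyGetD s i 0)) := by
    rw [hcons, List.countP_cons]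
    simp [hzero]
  rw [hstep]
  -- the mapped range is the n-element prefix of s
  have hfull : (PySem.List.pyRange 0 (s.length : Int) 1).map (fun j => PySem.List.pyGetD s j 0) = s :=
    PySem.List.map_pyGetD_pyRange_zero' s 0
  rw [PySem.List.pyRange_one_append 0 n (s.length : Int) (by omega) (by omega), List.map_append] at hfull
  have hAlen : ((PySem.List.pyRange 0 n 1).map (fun i => PySem.List.pyGetD s i 0)).length = n.toNat := by
    simp [PySem.List.length_pyRange_one]
  have hmap : (PySem.List.pyRange 0 n 1).map (fun i => PySem.List.pyGetD s i 0) = s.take n.toNat := by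
    conv_rhs => rw [← hfull]
    rw [List.take_left' hAlen]
  rw [← hmap, List.countP_map]
  rfl

-- a countP splits along any second predicate.
theorem pv_countP_split (p q : Int → Bool) (l : List Int) :
    l.countP p = l.countP (fun v => q v && p v) + l.countP (fun v => !q v && p v) := by
  induction l with
  | nil => simp
  | cons x t ih =>
    simp only [List.countP_cons]
    cases hq : q x <;> cases hp : p x <;> simp [hq, hp, ih] <;> omega

-- on a list whose elements not below T all equal T, the tail count is explicit.
theorem pv_count_tail (T : Int) (p : Int → Bool) (l : List Int)
    (h : ∀ x ∈ l, ¬ (x < T) → x = T) :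
    l.countP (fun v => !decide (v < T) && p v)
      = if p T then l.length - l.countP (fun v => decide (v < T)) else 0 := by
  induction l with
  | nil => simp
  | cons x t ih =>
    have hcle : t.countP (fun v => decide (v < T)) ≤ t.length := List.countP_le_length
    have iht := ih (fun y hy => h y (List.mem_cons_of_mem x hy))
    simp only [List.countP_cons, List.length_cons]
    by_cases hxT : x < T
    · simp only [decide_eq_true hxT, Bool.not_true, Bool.false_and]
      rw [iht]
      by_cases hpT : p T = true <;> simp [hpT] <;> omega
    · have hxeq : x = T := h x (List.mem_cons_self ..) hxT
      simp only [decide_eq_false hxT, Bool.not_false, Bool.true_and]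
      rw [iht, hxeq]
      by_cases hpT : p T = true <;> simp [hpT] <;> omega

-- splitting the count over the n smallest between the values below the threshold and the threshold itself.
theorem pv_split (line : List Int) (n : Int) (hne : line ≠ []) (h2 : 2 ≤ n)
    (hn : n ≤ (line.length : Int)) :
    ((((PySem.List.sorted line (fun x => x) false).take n.toNat).countP (pvPred line) : Nat) : Int)
      = (line.countP (fun v =>
            decide (v < PySem.List.pyGetD (PySem.List.sorted line (fun x => x) false) (n - 1) 0)
            && pvPred line v) : Int)
        + (if pvPred line (PySem.List.pyGetD (PySem.List.sorted line (fun x => x) false) (n - 1) 0)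
           then n - (line.countP (fun v =>
             decide (v < PySem.List.pyGetD (PySem.List.sorted line (fun x => x) false) (n - 1) 0)) : Int)
           else 0) := by
  set s := PySem.List.sorted line (fun x => x) false with hs
  have hL0 : 0 < line.length := List.length_pos_of_ne_nil hne
  have hslen : s.length = line.length := PySem.List.length_sorted ..
  have hperm : s.Perm line := PySem.List.sorted_perm ..
  have hT : PySem.List.pyGetD s (n - 1) 0 = s[n.toNat - 1]'(by omega) := by
    rw [PySem.List.pyGetD_eq_getElem _ _ (by omega) (by omega)]
    congr 1
    omega
  set T := PySem.List.pyGetD s (n - 1) 0 with hTdef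
  have htlen : (s.take n.toNat).length = n.toNat := by simp; omega
  have hle : ∀ x ∈ s.take n.toNat, ¬ (x < T) → x = T := by
    intro x hx hnx
    obtain ⟨k, hk, hxk⟩ := List.mem_iff_getElem.mp hx
    have hgd : (s.take n.toNat)[k]'hk = s[k]'(by rw [htlen] at hk; omega) := List.getElem_take
    have hxle : x ≤ T := by
      rw [hT, ← hxk, hgd]
      exact PySem.List.sorted_id_getElem_mono line (by rw [htlen] at hk; omega) (by rw [hslen]; omega)
    omega
  have hdrop : ∀ x ∈ s.drop n.toNat, T ≤ x := by
    intro x hx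
    obtain ⟨k, hk, hxk⟩ := List.mem_iff_getElem.mp hx
    have hklen : n.toNat + k < s.length := by
      rw [List.length_drop] at hk
      omega
    have hgd : (s.drop n.toNat)[k]'hk = s[n.toNat + k]'hklen := List.getElem_drop
    rw [hT, ← hxk, hgd]
    exact PySem.List.sorted_id_getElem_mono line (by omega) hklen
  have hext : ∀ (p : Int → Bool), (∀ x ∈ s.drop n.toNat, p x = false) →
      line.countP p = (s.take n.toNat).countP p := by
    intro p hp
    rw [← List.Perm.countP_eq p hperm]
    conv_lhs => rw [← List.take_append_drop n.toNat s]
    rw [List.countP_append]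
    have hz : (s.drop n.toNat).countP p = 0 :=
      List.countP_eq_zero.mpr (by intro a ha; simp [hp a ha])
    omega
  have e1 := pv_countP_split (pvPred line) (fun v => decide (v < T)) (s.take n.toNat)
  have e2 := pv_count_tail T (pvPred line) (s.take n.toNat) hle
  have e4 : line.countP (fun v => decide (v < T) && pvPred line v)
      = (s.take n.toNat).countP (fun v => decide (v < T) && pvPred line v) := by
    refine hext _ ?_
    intro x hx
    have := hdrop x hx
    simp only [Bool.and_eq_false_iff, decide_eq_false_iff_not]
    left
    omega
  have e5 : line.countP (fun v => decide (v < T))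
      = (s.take n.toNat).countP (fun v => decide (v < T)) := by
    refine hext _ ?_
    intro x hx
    have := hdrop x hx
    simp only [decide_eq_false_iff_not]
    omega
  have hcle : (s.take n.toNat).countP (fun v => decide (v < T)) ≤ n.toNat :=
    le_trans List.countP_le_length (le_of_eq htlen)
  rw [e1, e2, e4, e5]
  by_cases hPT : pvPred line T = true
  · rw [if_pos hPT, if_pos hPT]
    push_cast
    omega
  · rw [if_neg hPT, if_neg hPT]
    push_cast
    omega

-- B's counting loop computes the two countP's.
theorem pv_countLoop (P : Int → Bool) (T : Int) (xs : List Int) (c0 l0 : Int) :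
    xs.foldl (fun (cl : Int × Int) v =>
        if v < T then ((if P v = true then cl.1 + 1 else cl.1), cl.2 + 1) else cl) (c0, l0)
      = (c0 + (xs.countP (fun v => decide (v < T) && P v) : Int),
         l0 + (xs.countP (fun v => decide (v < T)) : Int)) := by
  induction xs generalizing c0 l0 with
  | nil => simp
  | cons x t ih =>
    simp only [List.foldl_cons, List.countP_cons]
    by_cases hq : x < T
    · rw [if_pos hq]
      by_cases hp : P x = true
      · rw [if_pos hp, ih]
        simp [hq, hp]
        constructor <;> push_cast <;> ring
      · rw [if_neg hp, ih]
        simp [hq, hp]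
        push_cast
        ring
    · rw [if_neg hq, ih]
      simp [hq]

-- an Option-match with an inner comparison as an if on the matched Boolean.
theorem pv_match_if (m : Option Int) (v c d : Int) :
    (match m with | some u => if u < v then c else d | none => d)
      = if ((m.map (fun u => decide (u < v))).getD false) = true then c else d := by
  cases m with
  | none => simp
  | some u => by_cases h : u < v <;> simp [h]

-- ===== VERDICT (by name: the statement is the Claim_ definition above) =====
theorem interesting_paixu_spec : Claim_equal_interesting_paixu := by
  intro n line _ hpre
  obtain ⟨hne, hlen⟩ := hpre
  have hL0 : 0 < line.length := List.length_pos_of_ne_nil hne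
  unfold Spec_interesting_paixu interesting_paixu interesting_paixu_alt
  by_cases hn1 : n ≤ 1
  · rw [if_pos hn1]
    simp only []
    rw [PySem.List.pyRange_one_eq_nil hn1]
    simp
  · rw [if_neg hn1]
    have h2 : 2 ≤ n := by omega
    simp only [Int.toNat_natCast]
    set s := PySem.List.sorted line (fun x => x) false with hs
    have hslen : s.length = line.length := PySem.List.length_sorted ..
    set g : Int → Int := fun i => ((line.idxOf (PySem.List.pyGetD s i 0) : Nat) : Int) with hg
    have hmem : ∀ i : Int, 0 ≤ i → i < (line.length : Int) → PySem.List.pyGetD s i 0 ∈ line := by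
      intro i h0 hi
      have hin : PySem.List.pyGetD s i 0 ∈ s := by
        apply PySem.List.pyGetD_mem
        unfold PySem.Raise.InRange
        rw [hslen]
        omega
      exact (PySem.List.mem_sorted _ _ _ _).mp hin
    have hmemL : ∀ p : Int, 0 ≤ p → p < (line.length : Int) → PySem.List.pyGetD line p 0 ∈ line := by
      intro p h0 hp
      apply PySem.List.pyGetD_mem
      unfold PySem.Raise.InRange
      omega
    set first := (PySem.List.enumerate line 0).foldl
        (fun d (p : Int × Int) => if d.contains p.2 then d else d.insert p.2 p.1) PySem.Dict.empty
        with hfirst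
    have hdict : ∀ v ∈ line, ((first.get? v).getD 0 : Int) = ((line.idxOf v : Nat) : Int) := by
      intro v hv
      rw [hfirst, pv_first_get line 0 _ v hv (PySem.Dict.contains_empty ..)]
      simp
    have hidxf : ∀ v ∈ line, (((PySem.List.index? line v).getD 0 : Nat) : Int) = ((line.idxOf v : Nat) : Int) := by
      intro v hv
      rw [pv_index?_mem line v hv]
      rfl
    -- ===== A's side =====
    have he0 : (((PySem.List.index? line (PySem.List.pyGetD s 0 0)).getD 0 : Nat) : Int) = g 0 :=
      hidxf _ (hmem 0 le_rfl (by exact_mod_cast hL0))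
    have hfoldA : (PySem.List.pyRange 1 n 1).foldl (fun (st : List Int × Int) i =>
          let seq := st.1 ++ [(((PySem.List.index? line (PySem.List.pyGetD s i 0)).getD 0 : Nat) : Int)]
          if PySem.List.pyGetD seq i 0 < PySem.List.pyGetD seq (i - 1) 0 then
            (PySem.List.pySetD seq i (PySem.List.pyGetD seq (i - 1) 0), st.2 + 1)
          else (seq, st.2)) ([] ++ [g 0], 0)
        = (PySem.List.pyRange 1 n 1).foldl (fun (st : List Int × Int) i =>
          let seq := st.1 ++ [g i]
          if PySem.List.pyGetD seq i 0 < PySem.List.pyGetD seq (i - 1) 0 then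
            (PySem.List.pySetD seq i (PySem.List.pyGetD seq (i - 1) 0), st.2 + 1)
          else (seq, st.2)) ([] ++ [g 0], 0) := by
      refine PySem.List.foldl_congr_mem _ _ _ _ ?_
      intro acc i hi
      obtain ⟨h1, h2'⟩ := (PySem.List.mem_pyRange_one).mp hi
      simp only []
      rw [hidxf _ (hmem i (by omega) (by omega))]
    obtain ⟨seq, m, hA, _, _, _, _⟩ := pv_loopA g n (by omega)
    rw [he0, hfoldA, hA]
    have hCA := pv_countA line n hne h2 hlen
    have hCnt : ((PySem.List.pyRange 1 n 1).countP
          (fun i => (PySem.List.pyRange 0 i 1).any (fun j => decide (g i < g j))))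
        = (s.take n.toNat).countP (pvPred line) := by
      rw [hg]
      exact hCA
    rw [hCnt]
    -- ===== B's side =====
    set T := PySem.List.pyGetD s (n - 1) 0 with hT
    have hTmem : T ∈ line := hmem (n - 1) (by omega) (by omega)
    -- the backward loop, with the dict lookup replaced by the first index
    have hfoldS : (PySem.List.pyRange ((line.length : Int) - 1) (-1) (-1)).foldl
          (fun (st : List (Option Int) × Option Int) p =>
            let v := PySem.List.pyGetD line p 0
            let m := if decide ((first.get? v).getD 0 = p) &&
                        (match st.2 with | none => true | some s => decide (v < s)) then some v else st.2
            (PySem.List.pySetD st.1 p m, m))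
          (List.replicate (line.length + 1) none, none)
        = (PySem.List.pyRange ((line.length : Int) - 1) (-1) (-1)).foldl
          (fun (st : List (Option Int) × Option Int) p =>
            let v := PySem.List.pyGetD line p 0
            let m := if decide ((((line.idxOf v : Nat)) : Int) = p) &&
                        (match st.2 with | none => true | some s => decide (v < s)) then some v else st.2
            (PySem.List.pySetD st.1 p m, m))
          (List.replicate (line.length + 1) none, none) := by
      refine PySem.List.foldl_congr_mem _ _ _ _ ?_
      intro acc p hp
      obtain ⟨h1, h2'⟩ := (PySem.List.mem_pyRange_neg_one).mp hp
      simp only []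
      rw [hdict _ (hmemL p (by omega) (by omega))]
    have hrepl : ∀ q : Nat, (List.replicate (line.length + 1) (none : Option Int)).getD q none = none := by
      intro q
      rw [List.getD_eq_getElem?_getD, List.getElem?_replicate]
      split <;> rfl
    have hInvTop : ∀ q : Nat, line.length ≤ q → pvInv line q none := by
      intro q hq
      simp only [pvInv]
      intro w hw
      have := List.idxOf_lt_length_of_mem hw
      push_cast
      omega
    have hsm := pv_sufLoop line line.length (le_refl _)
      (List.replicate (line.length + 1) none) none
      (by simp) (hInvTop line.length (le_refl _))
      (fun q hq hqL => by
        rw [hrepl q]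
        exact hInvTop q hq)
    -- the suffix-minimum lookups decide pvPred
    have hlook : ∀ v ∈ line,
        ((PySem.List.pyGetD
            (((PySem.List.pyRange ((line.length : Int) - 1) (-1) (-1)).foldl
              (fun (st : List (Option Int) × Option Int) p =>
                let v := PySem.List.pyGetD line p 0
                let m := if decide ((((line.idxOf v : Nat)) : Int) = p) &&
                            (match st.2 with | none => true | some s => decide (v < s)) then some v else st.2
                (PySem.List.pySetD st.1 p m, m))
              (List.replicate (line.length + 1) none, none)).1)
            (((line.idxOf v : Nat) : Int) + 1) none).map (fun u => decide (u < v))).getD false = pvPred line v := by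
      intro v hv
      have hidxlt : line.idxOf v < line.length := List.idxOf_lt_length_of_mem hv
      have hcast : (((line.idxOf v : Nat) : Int) + 1) = (((line.idxOf v + 1 : Nat)) : Int) := by
        push_cast
        ring
      rw [hcast, PySem.List.pyGetD_natCast]
      refine pv_lookup line v hv _ ?_
      have hinst := hsm (line.idxOf v + 1) (by omega)
      rw [show (((line.idxOf v + 1 : Nat)) : Int) = ((line.idxOf v : Nat) : Int) + 1 by push_cast; ring] at hinst
      exact hinst
    rw [hfoldS]
    -- the counting loop
    have hbody : line.foldl
          (fun (cl : Int × Int) v =>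
            if v < T then
              ((match PySem.List.pyGetD
                  (((PySem.List.pyRange ((line.length : Int) - 1) (-1) (-1)).foldl
                    (fun (st : List (Option Int) × Option Int) p =>
                      let v := PySem.List.pyGetD line p 0
                      let m := if decide ((((line.idxOf v : Nat)) : Int) = p) &&
                                  (match st.2 with | none => true | some s => decide (v < s)) then some v else st.2
                      (PySem.List.pySetD st.1 p m, m))
                    (List.replicate (line.length + 1) none, none)).1)
                  ((first.get? v).getD 0 + 1) none with
                | some u => if u < v then cl.1 + 1 else cl.1
                | none => cl.1), cl.2 + 1)
            else cl) (0, 0)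
        = ((line.countP (fun v => decide (v < T) && pvPred line v) : Int),
           (line.countP (fun v => decide (v < T)) : Int)) := by
      refine Eq.trans (PySem.List.foldl_congr_mem _ _ _ _ ?_)
        (Eq.trans (pv_countLoop (pvPred line) T line 0 0) (by simp))
      intro cl v hv
      simp only []
      rw [hdict v hv, pv_match_if, hlook v hv]
    rw [hbody]
    simp only []
    rw [hdict T hTmem, pv_match_if, hlook T hTmem]
    -- both counts agree
    have hsplit := pv_split line n hne h2 hlen
    rw [← hs, ← hT] at hsplit
    have hceq : (((s.take n.toNat).countP (pvPred line) : Nat) : Int)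
        = (if pvPred line T = true
           then (line.countP (fun v => decide (v < T) && pvPred line v) : Int)
              + (n - (line.countP (fun v => decide (v < T)) : Int))
           else (line.countP (fun v => decide (v < T) && pvPred line v) : Int)) := by
      rw [hsplit]
      by_cases hPT : pvPred line T = true
      · rw [if_pos hPT, if_pos hPT]
      · rw [if_neg hPT, if_neg hPT]
        ring
    rw [hceq]
    have hiff : (PySem.List.max? line (fun x => x) = PySem.List.pyGet? line (-1)
          ∧ (if pvPred line T = true
             then (line.countP (fun v => decide (v < T) && pvPred line v) : Int)
                + (n - (line.countP (fun v => decide (v < T)) : Int))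
             else (line.countP (fun v => decide (v < T) && pvPred line v) : Int)) > 0)
        ↔ (PySem.List.pyGet? line (-1) = PySem.List.max? line (fun x => x)
          ∧ (if pvPred line T = true
             then (line.countP (fun v => decide (v < T) && pvPred line v) : Int)
                + (n - (line.countP (fun v => decide (v < T)) : Int))
             else (line.countP (fun v => decide (v < T) && pvPred line v) : Int)) > 0) := by
      constructor <;> rintro ⟨h, h2'⟩ <;> exact ⟨h.symm, h2'⟩
    rw [if_congr hiff rfl rfl]
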